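-- pv_equiv track=rewrite | github.com/huytq000605/GrindLC | Easy Guys/Maximum Number of Integers to Choose From a Range I/solution.py | maxCount
-- ===== SOURCE A (Python) =====
-- from typing import List
--
-- def maxCount(banned: List[int], n: int, maxSum: int) -> int:
--     banned = set(banned)
--     result = 0
--     s = 0
--     for i in range(1, n+1):
--         if i not in banned and s + i <= maxSum:
--             result += 1
--             s += i
--     return result
-- ===== SOURCE B (Python) =====
-- def maxCount(banned, n, maxSum):
--     bs = sorted({b for b in banned if 1 <= b <= n})
--     cnt = 0
--     rem2 = 2 * maxSum  # doubled remaining budget, avoids fractional arithmetic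
--     prev = 0
--     for b in bs + [n + 1]:
--         lo, hi = prev + 1, b - 1
--         prev = b
--         if lo > hi:
--             continue
--         length = hi - lo + 1
--         total2 = (lo + hi) * length  # twice the sum of the run lo..hi
--         if total2 <= rem2:
--             cnt += length
--             rem2 -= total2
--         else:
--             # largest c in [0, length) with 2*(c*lo + c*(c-1)/2) <= rem2, by binary search
--             ok, bad = 0, length
--             while bad - ok > 1:
--                 mid = (ok + bad) // 2
--                 if mid * (2 * lo + mid - 1) <= rem2:
--                     ok = mid
--                 else:
--                     bad = mid
--             return cnt + ok
--     return cnt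
-- ===== Notes on version B (the rewrite author's own statement) =====
-- stated objective: faster
-- what changed: Replaces A's per-integer scan of 1..n with sorting the clamped banned values and consuming each banned-free run by a closed-form arithmetic-series check, with a binary search inside the single partial run.
import Mathlib
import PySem

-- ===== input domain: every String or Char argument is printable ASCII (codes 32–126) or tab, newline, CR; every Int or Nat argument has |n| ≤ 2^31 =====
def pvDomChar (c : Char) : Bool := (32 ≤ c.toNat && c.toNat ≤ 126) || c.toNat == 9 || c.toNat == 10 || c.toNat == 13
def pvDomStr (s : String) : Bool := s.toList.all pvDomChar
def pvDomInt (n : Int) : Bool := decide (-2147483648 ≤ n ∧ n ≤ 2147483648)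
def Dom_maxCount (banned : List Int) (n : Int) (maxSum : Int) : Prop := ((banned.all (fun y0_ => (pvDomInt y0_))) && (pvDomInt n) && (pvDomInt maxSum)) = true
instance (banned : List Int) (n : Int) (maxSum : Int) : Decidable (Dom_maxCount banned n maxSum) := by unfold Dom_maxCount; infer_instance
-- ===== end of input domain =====

-- B replaces A's per-integer scan of 1..n by sorting the clamped banned values and
-- consuming each gap between them with closed-form run sums plus a binary search in
-- the one partial run (objective: faster).

-- ===== PORT A =====
-- the loop body of A's for-loop (named helper; same code)
def stepA (bset : PySem.Set Int) (maxSum : Int) (st : Int × Int) (i : Int) : Int × Int :=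
  if i ∉ bset ∧ st.2 + i ≤ maxSum then (st.1 + 1, st.2 + i) else st

def maxCount (banned : List Int) (n : Int) (maxSum : Int) : Int :=
  let bset := PySem.Set.ofList banned
  ((PySem.List.pyRange 1 (n + 1) 1).foldl (stepA bset maxSum) (0, 0)).1

-- ===== PORT B =====
-- the inner `while bad - ok > 1` binary search of B
def bsearchB (lo rem2 : Int) (ok bad : Int) : Int :=
  if h : bad - ok > 1 then
    let mid := PySem.Int.floordiv (ok + bad) 2
    if mid * (2 * lo + mid - 1) ≤ rem2 then bsearchB lo rem2 mid bad
    else bsearchB lo rem2 ok mid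
  else ok
termination_by (bad - ok).toNat
decreasing_by
  all_goals
    simp only [PySem.Int.floordiv_eq_ediv_of_pos (by norm_num : (0:Int) < 2)] at *
    omega

-- the `for b in bs + [n+1]` loop of B
def bloopB : List Int → Int → Int → Int → Int
  | [], cnt, _, _ => cnt
  | b :: rest, cnt, rem2, prev =>
    let lo := prev + 1
    let hi := b - 1
    if lo > hi then bloopB rest cnt rem2 b
    else
      let length := hi - lo + 1
      let total2 := (lo + hi) * length
      if total2 ≤ rem2 then bloopB rest (cnt + length) (rem2 - total2) b
      else cnt + bsearchB lo rem2 0 length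

def maxCount_alt (banned : List Int) (n : Int) (maxSum : Int) : Int :=
  let bs := PySem.List.sorted (PySem.Set.ofList (banned.filter (fun b => decide (1 ≤ b ∧ b ≤ n)))) (fun x => x) false
  bloopB (bs ++ [n + 1]) 0 (2 * maxSum) 0

-- ===== PRECONDITION & SPEC =====
def Spec_maxCount (banned : List Int) (n : Int) (maxSum : Int) (out : Int) : Prop := out = maxCount_alt banned n maxSum
instance (banned : List Int) (n : Int) (maxSum : Int) (out : Int) : Decidable (Spec_maxCount banned n maxSum out) := by unfold Spec_maxCount; infer_instance

-- ===== CLAIM (what is proved, stated in full; the proofs are below) =====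
def Claim_equal_maxCount : Prop := ∀ (banned : List Int) (n : Int) (maxSum : Int), Dom_maxCount banned n maxSum → Spec_maxCount banned n maxSum (maxCount banned n maxSum)

-- ===== LEMMAS AND PROOFS =====

-- twice the sum of the run of c consecutive integers starting at lo
def F2 (lo c : Int) : Int := c * (2 * lo + c - 1)

-- greedy pick count over a run of `len` consecutive integers starting at lo, doubled budget rem2
def gcount : ℕ → Int → Int → Int
  | 0, _, _ => 0
  | len + 1, lo, rem2 => if 2 * lo ≤ rem2 then gcount len (lo + 1) (rem2 - 2 * lo) + 1 else 0

lemma gcount_char (len : ℕ) (lo rem2 : Int) :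
    0 ≤ gcount len lo rem2 ∧ gcount len lo rem2 ≤ (len : Int) ∧
    (gcount len lo rem2 = 0 ∨ F2 lo (gcount len lo rem2) ≤ rem2) ∧
    (gcount len lo rem2 = (len : Int) ∨ rem2 < F2 lo (gcount len lo rem2 + 1)) := by
  induction len generalizing lo rem2 with
  | zero => simp [gcount, F2]
  | succ m ih =>
    simp only [gcount]
    split_ifs with h
    · obtain ⟨h0, h1, h2, h3⟩ := ih (lo + 1) (rem2 - 2 * lo)
      refine ⟨by omega, by push_cast; omega, ?_, ?_⟩
      · rcases h2 with h2 | h2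
        · right; rw [h2]; simp [F2]; linarith
        · right; unfold F2 at h2 ⊢; nlinarith
      · rcases h3 with h3 | h3
        · left; rw [h3]; push_cast; ring
        · right; unfold F2 at h3 ⊢; nlinarith
    · refine ⟨le_refl _, by positivity, Or.inl rfl, Or.inr ?_⟩
      simp [F2]; linarith

lemma gcount_full (len : ℕ) (lo rem2 : Int) (hlo : 1 ≤ lo) (h : F2 lo (len : Int) ≤ rem2) :
    gcount len lo rem2 = (len : Int) := by
  induction len generalizing lo rem2 with
  | zero => simp [gcount]
  | succ m ih =>
    have hm : (0:Int) ≤ (m:Int) := by positivity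
    simp only [gcount]
    rw [if_pos (by unfold F2 at h; push_cast at h; nlinarith)]
    rw [ih (lo + 1) (rem2 - 2 * lo) (by omega)
      (by unfold F2 at h ⊢; push_cast at h ⊢; nlinarith)]
    push_cast; ring

lemma F2_mono (lo a b : Int) (hlo : 1 ≤ lo) (ha : 0 ≤ a) (hab : a ≤ b) : F2 lo a ≤ F2 lo b := by
  unfold F2; nlinarith

lemma bsearchB_eq (lo rem2 : Int) (hlo : 1 ≤ lo) (c : Int)
    (hc0 : c = 0 ∨ F2 lo c ≤ rem2) (hc1 : rem2 < F2 lo (c + 1)) :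
    ∀ ok bad : Int, 0 ≤ ok → ok ≤ c → c < bad → bsearchB lo rem2 ok bad = c := by
  have H : ∀ m : ℕ, ∀ ok bad : Int, (bad - ok).toNat ≤ m → 0 ≤ ok → ok ≤ c → c < bad →
      bsearchB lo rem2 ok bad = c := by
    intro m
    induction m with
    | zero => intro ok bad hm h0 hoc hcb; omega
    | succ k ih =>
      intro ok bad hm h0 hoc hcb
      rw [bsearchB]
      by_cases hgt : bad - ok > 1
      · rw [dif_pos hgt]
        have hmid : PySem.Int.floordiv (ok + bad) 2 = (ok + bad) / 2 :=
          PySem.Int.floordiv_eq_ediv_of_pos (by norm_num)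
        set mid := PySem.Int.floordiv (ok + bad) 2 with hmiddef
        have hb1 : ok < mid := by omega
        have hb2 : mid < bad := by omega
        by_cases hle : mid * (2 * lo + mid - 1) ≤ rem2
        · rw [if_pos hle]
          have hmc : mid ≤ c := by
            by_contra hmc
            have h1 : c + 1 ≤ mid := by omega
            have : F2 lo (c + 1) ≤ F2 lo mid := F2_mono lo (c + 1) mid hlo (by omega) h1
            have : F2 lo mid ≤ rem2 := hle
            unfold F2 at *
            nlinarith [hc1]
          exact ih mid bad (by omega) (by omega) hmc hcb
        · rw [if_neg hle]
          have hcm : c < mid := by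
            by_contra hcm
            have hmle : mid ≤ c := by omega
            rcases hc0 with h | h
            · omega
            · have : F2 lo mid ≤ F2 lo c := F2_mono lo mid c hlo (by omega) hmle
              unfold F2 at *
              nlinarith
          exact ih ok mid (by omega) h0 hoc hcm
      · rw [dif_neg hgt]; omega
  exact fun ok bad h0 hoc hcb => H (bad - ok).toNat ok bad le_rfl h0 hoc hcb

-- once the budget is exhausted below every remaining element, the fold is the identity
lemma stuck_fold (bset : PySem.Set Int) (maxSum : Int) :
    ∀ (L : List Int) (r s : Int), (∀ i ∈ L, maxSum < s + i) →
    L.foldl (stepA bset maxSum) (r, s) = (r, s) := by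
  intro L
  induction L with
  | nil => intro r s _; rfl
  | cons x t ih =>
    intro r s h
    have hx := h x (by simp)
    have hcond : ¬ (x ∉ bset ∧ s + x ≤ maxSum) := by
      intro hc; exact absurd hc.2 (by linarith)
    simp only [List.foldl_cons, stepA, if_neg hcond]
    exact ih r s (fun i hi => h i (by simp [hi]))

-- A's fold over a banned-free run lo..lo+len-1
lemma run_fold (bset : PySem.Set Int) (maxSum : Int) (len : ℕ) :
    ∀ (lo r s : Int), (∀ i, lo ≤ i → i < lo + (len : Int) → i ∉ bset) →
    ((PySem.List.pyRange lo (lo + (len : Int)) 1).foldl (stepA bset maxSum) (r, s)).1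
      = r + gcount len lo (2 * maxSum - 2 * s) ∧
    2 * ((PySem.List.pyRange lo (lo + (len : Int)) 1).foldl (stepA bset maxSum) (r, s)).2
      = 2 * s + F2 lo (gcount len lo (2 * maxSum - 2 * s)) := by
  induction len with
  | zero =>
    intro lo r s hfree
    simp [gcount, F2]
  | succ m ih =>
    intro lo r s hfree
    have hlt : lo < lo + ((m + 1 : ℕ) : Int) := by push_cast; omega
    rw [PySem.List.pyRange_one_cons hlt]
    have hnotmem : lo ∉ bset := hfree lo le_rfl (by push_cast; omega)
    by_cases hpick : s + lo ≤ maxSum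
    · have hstep : stepA bset maxSum (r, s) lo = (r + 1, s + lo) := by
        simp [stepA, hnotmem, hpick]
      have hrange : lo + ((m + 1 : ℕ) : Int) = (lo + 1) + ((m : ℕ) : Int) := by push_cast; ring
      rw [List.foldl_cons, hstep, hrange]
      obtain ⟨ih1, ih2⟩ := ih (lo + 1) (r + 1) (s + lo)
        (fun i hi1 hi2 => hfree i (by omega) (by push_cast at hi2 ⊢; omega))
      have hg : gcount (m + 1) lo (2 * maxSum - 2 * s)
          = gcount m (lo + 1) (2 * maxSum - 2 * (s + lo)) + 1 := by
        simp only [gcount, if_pos (by linarith : 2 * lo ≤ 2 * maxSum - 2 * s)]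
        ring_nf
      constructor
      · rw [ih1, hg]; ring
      · rw [ih2, hg]; unfold F2; ring
    · have hstep : stepA bset maxSum (r, s) lo = (r, s) := by
        simp [stepA, hpick]
      rw [List.foldl_cons, hstep]
      have hstuck : (PySem.List.pyRange (lo + 1) (lo + ((m + 1 : ℕ) : Int))).foldl
          (stepA bset maxSum) (r, s) = (r, s) := by
        apply stuck_fold
        intro i hi
        rw [PySem.List.mem_pyRange_one] at hi
        omega
      rw [hstuck]
      have hg : gcount (m + 1) lo (2 * maxSum - 2 * s) = 0 := by
        simp only [gcount, if_neg (by omega : ¬ 2 * lo ≤ 2 * maxSum - 2 * s)]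
      rw [hg]
      simp [F2]


lemma bloopB_nil (cnt rem2 prev : Int) : bloopB [] cnt rem2 prev = cnt := rfl

lemma bloopB_cons (b : Int) (rest : List Int) (cnt rem2 prev : Int) :
    bloopB (b :: rest) cnt rem2 prev =
      if prev + 1 > b - 1 then bloopB rest cnt rem2 b
      else if (prev + 1 + (b - 1)) * (b - 1 - (prev + 1) + 1) ≤ rem2 then
        bloopB rest (cnt + (b - 1 - (prev + 1) + 1)) (rem2 - (prev + 1 + (b - 1)) * (b - 1 - (prev + 1) + 1)) b
      else cnt + bsearchB (prev + 1) rem2 0 (b - 1 - (prev + 1) + 1) := rfl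

lemma main_ind (bset : PySem.Set Int) (n maxSum : Int) :
    ∀ (bs : List Int) (lo r s : Int), 1 ≤ lo →
    bs.Pairwise (· < ·) →
    (∀ b ∈ bs, lo ≤ b ∧ b ≤ n) →
    (∀ i, lo ≤ i → i ≤ n → (i ∈ bset ↔ i ∈ bs)) →
    ((PySem.List.pyRange lo (n + 1) 1).foldl (stepA bset maxSum) (r, s)).1
      = bloopB (bs ++ [n + 1]) r (2 * maxSum - 2 * s) (lo - 1) := by
  intro bs
  induction bs with
  | nil =>
    intro lo r s hlo _ _ hmem
    simp only [List.nil_append]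
    rw [bloopB_cons]
    by_cases hln : n < lo
    · rw [PySem.List.pyRange_one_eq_nil (by omega), if_pos (by omega)]
      simp [bloopB]
    · rw [if_neg (by omega)]
      set rem2 := 2 * maxSum - 2 * s with hrem2
      set len := (n + 1 - lo).toNat with hlen
      have hpr : (n : Int) + 1 = lo + (len : Int) := by omega
      have hfree : ∀ i, lo ≤ i → i < lo + (len : Int) → i ∉ bset := by
        intro i h1 h2 hmemi
        exact absurd ((hmem i h1 (by omega)).1 hmemi) (List.not_mem_nil)
      obtain ⟨hr1, hr2⟩ := run_fold bset maxSum len lo r s hfree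
      rw [← hpr] at hr1 hr2
      rw [hr1]
      have htot : (lo - 1 + 1 + (n + 1 - 1)) * (n + 1 - 1 - (lo - 1 + 1) + 1) = F2 lo (len : Int) := by
        unfold F2; have : (len : Int) = n + 1 - lo := by omega
        rw [this]; ring
      rw [htot]
      set c := gcount len lo rem2 with hc
      by_cases hfit : F2 lo (len : Int) ≤ rem2
      · rw [if_pos hfit, bloopB_nil]
        have hcf := gcount_full len lo rem2 hlo hfit
        omega
      · rw [if_neg hfit]
        obtain ⟨hg0, hg1, hg2, hg3⟩ := gcount_char len lo rem2
        rw [← hc] at hg0 hg1 hg2 hg3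
        have hclen : c ≠ (len : Int) := by
          intro hce
          rcases hg2 with h | h
          · omega
          · rw [hce] at h; exact hfit h
        have hrem : rem2 < F2 lo (c + 1) := by
          rcases hg3 with h | h
          · exact absurd h hclen
          · exact h
        have hc0 : c = 0 ∨ F2 lo c ≤ rem2 := hg2
        rw [show lo - 1 + 1 = lo from by omega]
        rw [bsearchB_eq lo rem2 hlo c hc0 hrem 0 (n + 1 - 1 - lo + 1) le_rfl hg0 (by omega)]
  | cons b rest ih =>
    intro lo r s hlo hpw hbd hmem
    have hb : lo ≤ b ∧ b ≤ n := hbd b (List.mem_cons_self)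
    have hrestgt : ∀ x ∈ rest, b < x := fun x hx => (List.pairwise_cons.mp hpw).1 x hx
    simp only [List.cons_append]
    rw [bloopB_cons]
    by_cases hbe : b = lo
    · rw [if_pos (by omega)]
      rw [PySem.List.pyRange_one_cons (by omega : lo < n + 1), List.foldl_cons]
      have hbmem : lo ∈ bset := (hmem lo le_rfl (by omega)).2 (by rw [← hbe]; exact List.mem_cons_self)
      have hstep : stepA bset maxSum (r, s) lo = (r, s) := by
        simp [stepA, hbmem]
      rw [hstep]
      have := ih (lo + 1) r s (by omega) (List.pairwise_cons.mp hpw).2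
        (fun x hx => ⟨by have := hrestgt x hx; omega, (hbd x (List.mem_cons_of_mem b hx)).2⟩)
        (fun i h1 h2 => by
          rw [hmem i (by omega) h2, List.mem_cons]
          constructor
          · rintro (h | h)
            · omega
            · exact h
          · exact fun h => Or.inr h)
      rw [this]
      have : lo + 1 - 1 = b := by omega
      rw [this]
    · rw [if_neg (by omega)]
      have hblo : lo < b := by omega
      set rem2 := 2 * maxSum - 2 * s with hrem2
      set len := (b - lo).toNat with hlen
      have hpr : (b : Int) = lo + (len : Int) := by omega
      rw [PySem.List.pyRange_one_append lo b (n + 1) (by omega) (by omega), List.foldl_append]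
      have hfree : ∀ i, lo ≤ i → i < lo + (len : Int) → i ∉ bset := by
        intro i h1 h2 hmemi
        have := (hmem i h1 (by omega)).1 hmemi
        rcases List.mem_cons.mp this with h | h
        · omega
        · have := hrestgt i h; omega
      obtain ⟨hr1, hr2⟩ := run_fold bset maxSum len lo r s hfree
      rw [← hpr] at hr1 hr2
      set p := (PySem.List.pyRange lo b).foldl (stepA bset maxSum) (r, s) with hp
      have htot : (lo - 1 + 1 + (b - 1)) * (b - 1 - (lo - 1 + 1) + 1) = F2 lo (len : Int) := by
        unfold F2; have : (len : Int) = b - lo := by omega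
        rw [this]; ring
      rw [htot]
      set c := gcount len lo rem2 with hc
      have hbmem : b ∈ bset := (hmem b (by omega) (by omega)).2 List.mem_cons_self
      by_cases hfit : F2 lo (len : Int) ≤ rem2
      · rw [if_pos hfit]
        have hcfull : c = (len : Int) := gcount_full len lo rem2 hlo hfit
        rw [PySem.List.pyRange_one_cons (by omega : b < n + 1), List.foldl_cons]
        have hstep : stepA bset maxSum p b = p := by
          simp [stepA, hbmem]
        rw [hstep]
        have hpp : p = (p.1, p.2) := rfl
        rw [hpp]
        have := ih (b + 1) p.1 p.2 (by omega) (List.pairwise_cons.mp hpw).2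
          (fun x hx => ⟨by have := hrestgt x hx; omega, (hbd x (List.mem_cons_of_mem b hx)).2⟩)
          (fun i h1 h2 => by
            rw [hmem i (by omega) h2, List.mem_cons]
            constructor
            · rintro (h | h)
              · omega
              · exact h
            · exact fun h => Or.inr h)
        rw [this]
        rw [hcfull] at hr2
        have e1 : p.1 = r + (b - 1 - (lo - 1 + 1) + 1) := by rw [hr1, hcfull]; omega
        have e2 : 2 * maxSum - 2 * p.2 = rem2 - F2 lo (len : Int) := by omega
        rw [e1, e2]
        have : b + 1 - 1 = b := by omega
        rw [this]
      · rw [if_neg hfit]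
        obtain ⟨hg0, hg1, hg2, hg3⟩ := gcount_char len lo rem2
        rw [← hc] at hg0 hg1 hg2 hg3
        have hlen1 : 1 ≤ (len : Int) := by omega
        have hclen : c ≠ (len : Int) := by
          intro hce
          rcases hg2 with h | h
          · omega
          · rw [hce] at h; exact hfit h
        have hrem : rem2 < F2 lo (c + 1) := by
          rcases hg3 with h | h
          · exact absurd h hclen
          · exact h
        have hdiff : F2 lo (c + 1) = F2 lo c + 2 * lo + 2 * c := by unfold F2; ring
        have hstuck : (PySem.List.pyRange b (n + 1)).foldl (stepA bset maxSum) (p.1, p.2) = (p.1, p.2) := by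
          apply stuck_fold
          intro i hi
          rw [PySem.List.mem_pyRange_one] at hi
          have h2p : 2 * p.2 = 2 * s + F2 lo c := hr2
          rcases hg2 with hczero | hFc
          · have hF0 : F2 lo c = 0 := by rw [hczero]; simp [F2]
            omega
          · omega
        have hpp : p = (p.1, p.2) := rfl
        rw [hpp, hstuck, hr1]
        rw [show lo - 1 + 1 = lo from by omega]
        rw [bsearchB_eq lo rem2 hlo c hg2 hrem 0 (b - 1 - lo + 1) le_rfl hg0 (by omega)]

-- ===== VERDICT (by name: the statement is the Claim_ definition above) =====
theorem maxCount_spec : Claim_equal_maxCount := by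
  intro banned n maxSum _
  unfold Spec_maxCount maxCount maxCount_alt
  set bset := PySem.Set.ofList banned with hbset
  set bs := PySem.List.sorted (PySem.Set.ofList (banned.filter (fun b => decide (1 ≤ b ∧ b ≤ n)))) (fun x => x) false with hbs
  have hmembs : ∀ x : Int, x ∈ bs ↔ x ∈ banned ∧ (1 ≤ x ∧ x ≤ n) := by
    intro x
    rw [hbs, PySem.List.mem_sorted, PySem.Set.mem_ofList, List.mem_filter]
    simp
  have hpw : bs.Pairwise (· < ·) := PySem.List.sorted_ofList_pairwise_lt _
  have hbd : ∀ b ∈ bs, 1 ≤ b ∧ b ≤ n := fun b hb => ((hmembs b).mp hb).2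
  have hmem : ∀ i : Int, 1 ≤ i → i ≤ n → (i ∈ bset ↔ i ∈ bs) := by
    intro i h1 h2
    rw [hbset, PySem.Set.mem_ofList, hmembs]
    exact ⟨fun h => ⟨h, h1, h2⟩, fun h => h.1⟩
  have := main_ind bset n maxSum bs 1 0 0 le_rfl hpw hbd hmem
  norm_num at this
  exact this
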